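-- pv_equiv track=rewrite | github.com/stvngo/Assignments | DSC20 Assignments/Homework/hw03.py | change_input_even_more
-- ===== SOURCE A (Python) =====
-- def change_input_even_more(strange_list):
--     """
--     Takes a list of strings and decodes each string by multiplying
--     each digit by two and moving them to the end of the string, converting
--     lowercase vowels to uppercase, and keeping everything else the same.
--
--     >>> change_input_even_more(["3.14IS PIE", "11My aGe iS"])
--     ['.IS PIE628', 'My AGE IS22']
--     >>> change_input_even_more(["go t6o sleep at ", \
--         "5i like to start work before "])
--     ['gO tO slEEp At 12', 'I lIkE tO stArt wOrk bEfOrE 10']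
--     >>> change_input_even_more("11My aGe iS")
--     Traceback (most recent call last):
--     ...
--     AssertionError
--     >>> change_input_even_more(["11My aGe iS"])
--     ['My AGE IS22']
--     >>> change_input_even_more([23.0])
--     Traceback (most recent call last):
--     ...
--     AssertionError
--     >>> change_input_even_more(["1-need-help"])
--     ['-nEEd-hElp2']
--     """
--     times_two = 2
--     assert isinstance(strange_list, list)
--     assert all(isinstance(item, str) for item in strange_list)
--     return ["".join(char.upper() if char in "aeiou" else char \
--             for char in s if not char.isdigit()) \
--             + "".join(str(int(char)*times_two) \
--             for char in s if char.isdigit()) for s in strange_list]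
-- ===== SOURCE B (Python) =====
-- def change_input_even_more(strange_list):
--     assert isinstance(strange_list, list)
--     assert all(isinstance(item, str) for item in strange_list)
--
--     def decode(s):
--         head, tail = "", ""
--         for char in s:
--             if char.isdigit():
--                 tail += str(int(char) * 2)
--             elif char in "aeiou":
--                 head += char.upper()
--             else:
--                 head += char
--         return head + tail
--
--     return [decode(s) for s in strange_list]
-- ===== Notes on version B (the rewrite author's own statement) =====
-- stated objective: faster
-- what changed: Replaces A's two filtered generator passes per string (non-digits transformed, then digits doubled) with a single traversal maintaining head and tail accumulators.
import Mathlib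
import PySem

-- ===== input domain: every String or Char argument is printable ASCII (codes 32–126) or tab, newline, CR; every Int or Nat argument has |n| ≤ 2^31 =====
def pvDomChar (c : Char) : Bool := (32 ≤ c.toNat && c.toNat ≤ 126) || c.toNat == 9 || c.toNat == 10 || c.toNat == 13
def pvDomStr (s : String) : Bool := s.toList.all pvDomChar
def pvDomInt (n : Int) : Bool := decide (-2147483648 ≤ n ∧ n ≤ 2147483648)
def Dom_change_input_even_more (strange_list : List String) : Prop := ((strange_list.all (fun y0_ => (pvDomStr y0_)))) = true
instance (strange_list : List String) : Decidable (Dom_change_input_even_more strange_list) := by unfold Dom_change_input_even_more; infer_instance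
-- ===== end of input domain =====

-- B is one pass per string with head/tail accumulators instead of A's two filtered passes; same O(n) cost.

-- shared helper: Python's  str(int(char) * 2)  for a digit char (identical expression in both sources)
def pvDigitTimesTwo (c : Char) : List Char :=
  PySem.Int.toChars (((PySem.Int.ofChars? [c]).getD 0) * 2)

-- ===== PORT A =====
def change_input_even_more (strange_list : List String) : List String :=
  strange_list.map (fun s =>
    String.ofList
      (((s.toList.filter (fun c => !PySem.Chars.isdigit c)).map
          (fun c => if c ∈ ['a','e','i','o','u'] then PySem.Chars.upperChar c else c))
        ++ ((s.toList.filter (fun c => PySem.Chars.isdigit c)).flatMap pvDigitTimesTwo)))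

-- ===== PORT B =====
def pvStep (acc : List Char × List Char) (c : Char) : List Char × List Char :=
  if PySem.Chars.isdigit c then (acc.1, acc.2 ++ pvDigitTimesTwo c)
  else if c ∈ ['a','e','i','o','u'] then (acc.1 ++ [PySem.Chars.upperChar c], acc.2)
  else (acc.1 ++ [c], acc.2)

def change_input_even_more_alt (strange_list : List String) : List String :=
  strange_list.map (fun s =>
    let ht := s.toList.foldl pvStep ([], [])
    String.ofList (ht.1 ++ ht.2))

-- ===== PRECONDITION & SPEC =====
def Spec_change_input_even_more (strange_list : List String) (out : List String) : Prop := out = change_input_even_more_alt strange_list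
instance (strange_list : List String) (out : List String) : Decidable (Spec_change_input_even_more strange_list out) := by unfold Spec_change_input_even_more; infer_instance

-- ===== CLAIM (what is proved, stated in full; the proofs are below) =====
def Claim_equal_change_input_even_more : Prop := ∀ (strange_list : List String), Dom_change_input_even_more strange_list → Spec_change_input_even_more strange_list (change_input_even_more strange_list)

-- ===== LEMMAS AND PROOFS =====

lemma pvFoldl_step (cs : List Char) (h t : List Char) :
    cs.foldl pvStep (h, t) =
      (h ++ (cs.filter (fun c => !PySem.Chars.isdigit c)).map
              (fun c => if c ∈ ['a','e','i','o','u'] then PySem.Chars.upperChar c else c),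
       t ++ (cs.filter (fun c => PySem.Chars.isdigit c)).flatMap pvDigitTimesTwo) := by
  induction cs generalizing h t with
  | nil => simp
  | cons c cs ih =>
    rw [List.foldl_cons, ih]
    by_cases hd : PySem.Chars.isdigit c
    · simp [pvStep, hd]
    · by_cases hv : c ∈ ['a','e','i','o','u']
      · rw [pvStep, if_neg (by simp [hd]), if_pos hv]
        simp [hd]
        simp only [List.mem_cons, List.not_mem_nil, or_false] at hv
        intro h1 h2 h3 h4 h5
        tauto
      · rw [pvStep, if_neg (by simp [hd]), if_neg hv]
        simp [hd]
        simp only [List.mem_cons, List.not_mem_nil, or_false] at hv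
        intro hcon
        tauto

-- ===== VERDICT (by name: the statement is the Claim_ definition above) =====
theorem change_input_even_more_spec : Claim_equal_change_input_even_more := by
  intro strange_list _
  unfold Spec_change_input_even_more change_input_even_more change_input_even_more_alt
  refine List.map_congr_left (fun s _ => ?_)
  simp [pvFoldl_step]
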